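-- pv_equiv track=rewrite | github.com/HY-D1/textbook-pdf-helper | src/algl_pdf_helper/markdown_generator.py | format_table_output
-- ===== SOURCE A (Python) =====
-- def format_table_output(text: str) -> str:
--     """Format table output sections.
--
--     Identifies result tables and formats them as markdown tables or code blocks.
--     """
--     lines = text.split('\n')
--     result = []
--     in_table = False
--     table_buffer = []
--
--     for line in lines:
--         # Detect table-like output
--         has_table_chars = '|' in line or '---' in line or line.strip().startswith('►')
--         looks_like_data = any(c.isdigit() for c in line) and len(line.split()) >= 2
--
--         if (has_table_chars or looks_like_data) and not in_table:
--             in_table = True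
--             table_buffer = [line]
--         elif (has_table_chars or looks_like_data or line.strip() == '') and in_table:
--             table_buffer.append(line)
--         elif in_table:
--             # End table
--             if table_buffer:
--                 result.append("```")
--                 result.extend(table_buffer)
--                 result.append("```")
--                 table_buffer = []
--             in_table = False
--             result.append(line)
--         else:
--             result.append(line)
--
--     # Handle table at end
--     if in_table and table_buffer:
--         result.append("```")
--         result.extend(table_buffer)
--         result.append("```")
--
--     return '\n'.join(result)
-- ===== SOURCE B (Python) =====
-- def format_table_output(text: str) -> str:
--     """Format table output sections: classify lines first, then group runs."""
--     lines = text.split('\n')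
--     # Pass 1: boolean mask — True while inside a table block.
--     mask = []
--     prev = False
--     for line in lines:
--         trigger = ('|' in line or '---' in line or line.strip().startswith('►')
--                    or (any(c.isdigit() for c in line) and len(line.split()) >= 2))
--         prev = trigger or (prev and line.strip() == '')
--         mask.append(prev)
--     # Pass 2: emit runs of equal mask value; True runs get fenced.
--     out = []
--     i = 0
--     n = len(lines)
--     while i < n:
--         j = i
--         while j < n and mask[j] == mask[i]:
--             j += 1
--         if mask[i]:
--             out.append('```')
--             out.extend(lines[i:j])
--             out.append('```')
--         else:
--             out.extend(lines[i:j])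
--         i = j
--     return '\n'.join(out)
-- ===== Notes on version B (the rewrite author's own statement) =====
-- stated objective: alternative
-- what changed: Replaced A's single stateful loop with buffer accumulation and tail flushing by a two-pass classify-then-group decomposition: one pass computes a boolean table-mask per line, a second pass groups consecutive equal mask values and fences the True runs, so no tail special case is needed.
import Mathlib
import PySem

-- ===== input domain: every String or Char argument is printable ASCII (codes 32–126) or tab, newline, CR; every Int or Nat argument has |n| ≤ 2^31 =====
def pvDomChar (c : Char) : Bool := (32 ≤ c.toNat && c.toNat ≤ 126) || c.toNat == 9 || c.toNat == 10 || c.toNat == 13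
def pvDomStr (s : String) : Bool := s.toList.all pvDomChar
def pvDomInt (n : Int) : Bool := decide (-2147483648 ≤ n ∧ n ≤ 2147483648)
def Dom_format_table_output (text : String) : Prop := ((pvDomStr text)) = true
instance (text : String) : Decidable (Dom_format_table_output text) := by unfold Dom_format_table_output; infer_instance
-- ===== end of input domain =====

-- B replaces A's single stateful buffer loop by a classify-then-group decomposition
-- (boolean mask pass, then run grouping); objective: alternative structure, same cost.

-- ===== PORT A =====
def pvHasTableChars (line : String) : Bool :=
  PySem.Str.isIn "|" line || PySem.Str.isIn "---" line ||
    PySem.Str.startswith (PySem.Str.strip line) "►"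

def pvLooksLikeData (line : String) : Bool :=
  line.toList.any PySem.Chars.isdigit && decide (2 ≤ (PySem.Str.split₀ line).length)

def pvALoop : List String → List String × Bool × List String → List String × Bool × List String
  | [], st => st
  | line :: rest, (result, in_table, buffer) =>
    let htc := pvHasTableChars line
    let lld := pvLooksLikeData line
    if (htc || lld) && !in_table then
      pvALoop rest (result, true, [line])
    else if (htc || lld || PySem.Str.strip line == "") && in_table then
      pvALoop rest (result, in_table, buffer ++ [line])
    else if in_table then
      let rb : List String × List String :=
        if buffer.isEmpty then (result, buffer)
        else (result ++ ["```"] ++ buffer ++ ["```"], [])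
      pvALoop rest (rb.1 ++ [line], false, rb.2)
    else
      pvALoop rest (result ++ [line], in_table, buffer)

def format_table_output (text : String) : String :=
  let lines := (PySem.Chars.splitOn text.toList ['\n']).map String.ofList
  let st := pvALoop lines ([], false, [])
  let result := if st.2.1 && !st.2.2.isEmpty then st.1 ++ ["```"] ++ st.2.2 ++ ["```"] else st.1
  PySem.Str.join "\n" result

-- ===== PORT B =====
def pvTrigger (line : String) : Bool :=
  PySem.Str.isIn "|" line || PySem.Str.isIn "---" line ||
    PySem.Str.startswith (PySem.Str.strip line) "►" ||
    (line.toList.any PySem.Chars.isdigit && decide (2 ≤ (PySem.Str.split₀ line).length))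

-- pass 1: boolean mask, carrying the running in-table state
def pvMask : List String → Bool → List Bool
  | [], _ => []
  | line :: rest, prev =>
    let m := pvTrigger line || (prev && PySem.Str.strip line == "")
    m :: pvMask rest m

-- pass 2: group consecutive equal mask values; fence the True runs
def pvEmit : List (Bool × String) → List String
  | [] => []
  | (b, l) :: rest =>
    let run := rest.takeWhile (fun p => p.1 == b)
    let rest' := rest.dropWhile (fun p => p.1 == b)
    (if b then "```" :: l :: run.map Prod.snd ++ ["```"] else l :: run.map Prod.snd)
      ++ pvEmit rest'
termination_by p => p.length
decreasing_by
  simp only [List.length_cons]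
  have := List.length_dropWhile_le (fun p => p.1 == b) rest
  omega

def format_table_output_alt (text : String) : String :=
  let lines := (PySem.Chars.splitOn text.toList ['\n']).map String.ofList
  let mask := pvMask lines false
  PySem.Str.join "\n" (pvEmit (mask.zip lines))

-- ===== PRECONDITION & SPEC =====
def Spec_format_table_output (text : String) (out : String) : Prop := out = format_table_output_alt text
instance (text : String) (out : String) : Decidable (Spec_format_table_output text out) := by unfold Spec_format_table_output; infer_instance

-- ===== CLAIM (what is proved, stated in full; the proofs are below) =====
def Claim_equal_format_table_output : Prop := ∀ (text : String), Dom_format_table_output text → Spec_format_table_output text (format_table_output text)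

-- ===== LEMMAS AND PROOFS =====

-- mask zipped with its lines, fused (proof helper)
def pvZM : List String → Bool → List (Bool × String)
  | [], _ => []
  | line :: rest, prev =>
    let m := pvTrigger line || (prev && PySem.Str.strip line == "")
    (m, line) :: pvZM rest m

theorem pvZip_mask (ls : List String) (p : Bool) : (pvMask ls p).zip ls = pvZM ls p := by
  induction ls generalizing p with
  | nil => rfl
  | cons l rest ih => simp only [pvMask, pvZM, List.zip_cons_cons, ih]

theorem pvTrigger_eq (l : String) :
    (pvHasTableChars l || pvLooksLikeData l) = pvTrigger l := by
  simp only [pvHasTableChars, pvLooksLikeData, pvTrigger, Bool.or_assoc]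

theorem pvEmit_false (p : List (Bool × String)) (l : String) :
    pvEmit ((false, l) :: p) = l :: pvEmit p := by
  match p with
  | [] => simp [pvEmit]
  | (true, x) :: p' => simp [pvEmit]
  | (false, x) :: p' => simp [pvEmit]

def pvFinish : List String × Bool × List String → List String
  | (r, t, b) => if t && !b.isEmpty then r ++ ["```"] ++ b ++ ["```"] else r

theorem pvMain (ls : List String) (result buffer : List String) (prev : Bool)
    (hb : prev = true → buffer ≠ []) :
    pvFinish (pvALoop ls (result, prev, buffer)) =
      (if prev then
        result ++ ["```"] ++ buffer ++ ((pvZM ls true).takeWhile (fun p => p.1 == true)).map Prod.snd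
          ++ ["```"] ++ pvEmit ((pvZM ls true).dropWhile (fun p => p.1 == true))
      else result ++ pvEmit (pvZM ls false)) := by
  induction ls generalizing result buffer prev with
  | nil =>
    cases prev with
    | false => simp [pvALoop, pvFinish, pvZM, pvEmit]
    | true =>
      have h := hb rfl
      simp [pvALoop, pvFinish, pvZM, pvEmit, h]
  | cons line rest ih =>
    have htrig := pvTrigger_eq line
    cases prev with
    | false =>
      by_cases ht : (pvHasTableChars line || pvLooksLikeData line) = true
      · -- trigger line starts a table
        have htl : pvTrigger line = true := htrig ▸ ht
        rw [show pvALoop (line :: rest) (result, false, buffer)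
              = pvALoop rest (result, true, [line]) by simp [pvALoop, ht]]
        rw [ih result [line] true (fun _ => by simp)]
        simp [pvZM, htl, pvEmit]
      · -- no trigger, table not open: line passes through
        obtain ⟨hA, hB⟩ : pvHasTableChars line = false ∧ pvLooksLikeData line = false := by
          simpa using ht
        have htl : pvTrigger line = false := by rw [← htrig]; simp [hA, hB]
        rw [show pvALoop (line :: rest) (result, false, buffer)
              = pvALoop rest (result ++ [line], false, buffer) by
            simp [pvALoop, hA, hB]]
        rw [ih (result ++ [line]) buffer false (by simp)]
        simp [pvZM, htl, pvEmit_false]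
    | true =>
      have hbuf := hb rfl
      have hE : buffer.isEmpty = false := by simpa [List.isEmpty_iff] using hbuf
      by_cases hc : (pvHasTableChars line || (pvLooksLikeData line
                      || PySem.Str.strip line == "")) = true
      · -- trigger or blank continues the table
        have hm : (pvTrigger line || (true && (PySem.Str.strip line == ""))) = true := by
          rw [← htrig]
          simp only [Bool.true_and, Bool.or_assoc]
          exact hc
        have step : pvALoop (line :: rest) (result, true, buffer)
            = pvALoop rest (result, true, buffer ++ [line]) := by
          simp only [Bool.or_eq_true] at hc
          rcases hc with h1 | h2 | h3
          · simp [pvALoop, h1]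
          · simp [pvALoop, h2]
          · simp [pvALoop, h3]
        rw [step]
        rw [ih result (buffer ++ [line]) true (fun _ => by simp)]
        simp only [pvZM, hm, if_true, List.takeWhile_cons, List.dropWhile_cons]
        simp
      · -- neither trigger nor blank: table is flushed, line passes through
        obtain ⟨hA, hB, hC⟩ : pvHasTableChars line = false ∧ pvLooksLikeData line = false
            ∧ (PySem.Str.strip line == "") = false := by
          simpa using hc
        have hm : (pvTrigger line || (true && (PySem.Str.strip line == ""))) = false := by
          rw [← htrig]; simp [hA, hB, hC]
        rw [show pvALoop (line :: rest) (result, true, buffer)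
              = pvALoop rest (result ++ ["```"] ++ buffer ++ ["```"] ++ [line], false, []) by
            simp [pvALoop, hA, hB, hC, hE]]
        rw [ih (result ++ ["```"] ++ buffer ++ ["```"] ++ [line]) [] false (by simp)]
        simp only [pvZM, hm, List.takeWhile_cons, List.dropWhile_cons]
        simp [pvEmit_false]

-- ===== VERDICT (by name: the statement is the Claim_ definition above) =====
theorem format_table_output_spec : Claim_equal_format_table_output := by
  intro text _
  show format_table_output text = format_table_output_alt text
  have h := pvMain ((PySem.Chars.splitOn text.toList ['\n']).map String.ofList) [] [] false
    (by simp)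
  simp only [pvFinish, List.nil_append] at h
  unfold format_table_output format_table_output_alt
  simp only [pvZip_mask]
  exact congrArg (PySem.Str.join "\n") h
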